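-- pv_equiv track=rewrite | github.com/s-surineni/atice | ppython/leet_code/array_formation.py | check_array_formation
-- ===== SOURCE A (Python) =====
-- def check_array_formation(arr, pieces):
--     idx = 0
--     while idx < len(arr):
--         # val = arr[idx]
--         res = False
--         for arr2 in pieces:
--             if idx == len(arr):
--                 return res
--             if arr[idx] == arr2[0]:
--                 for val2 in arr2:
--                     if arr[idx] != val2:
--                         return False
--                     idx += 1
--                 res = True
--         if not res:
--             return res
--     return res
-- ===== SOURCE B (Python) =====
-- def check_array_formation(arr, pieces):
--     by_head = {}
--     for p in pieces:
--         by_head.setdefault(p[0], p)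
--     i = 0
--     n = len(arr)
--     while i < n:
--         p = by_head.get(arr[i])
--         if p is None or arr[i:i+len(p)] != p:
--             return False
--         i += len(p)
--     return True
-- ===== Notes on version B (the rewrite author's own statement) =====
-- stated objective: idiomatic
-- what changed: B builds a dict from first element to piece once and does a single greedy pass over arr with a dict lookup and a slice comparison per step, instead of A's nested rescan of the whole pieces list on every pass of the outer while loop.
-- outside the precondition, e.g. on check_array_formation([1, 2, 9], [[2], [1], [2, 9]]): A returns True, B returns False; on check_array_formation([1, 2], [[2, 3]]): A returns False, B returns False
import Mathlib
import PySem

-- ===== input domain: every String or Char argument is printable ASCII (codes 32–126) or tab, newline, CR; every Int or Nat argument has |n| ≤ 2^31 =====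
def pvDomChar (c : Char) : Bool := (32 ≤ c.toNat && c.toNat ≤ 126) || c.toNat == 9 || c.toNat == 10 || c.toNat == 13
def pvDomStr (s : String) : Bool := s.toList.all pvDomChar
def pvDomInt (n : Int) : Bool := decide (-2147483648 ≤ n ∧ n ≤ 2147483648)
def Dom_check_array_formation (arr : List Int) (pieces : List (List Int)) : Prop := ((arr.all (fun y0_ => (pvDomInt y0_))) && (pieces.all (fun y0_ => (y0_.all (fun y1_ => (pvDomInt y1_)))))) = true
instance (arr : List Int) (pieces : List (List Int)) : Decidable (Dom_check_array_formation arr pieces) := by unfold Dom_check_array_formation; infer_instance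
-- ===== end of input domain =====

-- B replaces A's repeated rescan of the pieces list by a first-element-to-piece hash map
-- built once and a single greedy pass over arr (objective: idiomatic; not measurably faster).


-- ===== PORT A =====
-- inner 'for val2 in arr2' loop: some idx' = loop completed with the new idx; none = 'return False'
-- (mismatch) — or Python's IndexError on arr[idx], which Pre_ excludes.
def pvInnerA (arr : List Int) (idx : Nat) : List Int → Option Nat
  | [] => some idx
  | v :: rest =>
    match PySem.List.pyGet? arr (idx : Int) with
    | none => none            -- Python raises IndexError here; outside Pre_
    | some x => if x = v then pvInnerA arr (idx + 1) rest else none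

-- 'for arr2 in pieces' loop: .inl b = early 'return b'; .inr (idx, res) = loop completed.
def pvForA (arr : List Int) (idx : Nat) (res : Bool) : List (List Int) → Sum Bool (Nat × Bool)
  | [] => .inr (idx, res)
  | p :: rest =>
    if idx = arr.length then .inl res
    else
      match PySem.List.pyGet? arr (idx : Int), PySem.List.pyGet? p 0 with
      | some x, some h =>
        if x = h then
          match pvInnerA arr idx p with
          | none => .inl false
          | some idx' => pvForA arr idx' true rest
        else pvForA arr idx res rest
      | _, _ => .inl false    -- Python raises IndexError (arr2[0] of an empty piece); outside Pre_

-- the outer 'while idx < len(arr)' loop; structural fuel only makes it total: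
-- arr.length + 1 passes always suffice (each non-returning pass advances idx, see whileA_eq)
def pvWhileA (arr : List Int) (pieces : List (List Int)) (fuel : Nat) (idx : Nat) (res : Bool) : Bool :=
  match fuel with
  | 0 => false               -- unreachable from check_array_formation (proved in whileA_eq)
  | fuel + 1 =>
    if idx < arr.length then
      match pvForA arr idx false pieces with
      | .inl b => b
      | .inr (idx', res') =>
        if res' then pvWhileA arr pieces fuel idx' res'
        else false           -- 'if not res: return res'
    else res

-- Python's 'res' is unbound when arr = [] (UnboundLocalError); outside Pre_, initial false is arbitrary.
def check_array_formation (arr : List Int) (pieces : List (List Int)) : Bool :=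
  pvWhileA arr pieces (arr.length + 1) 0 false

-- ===== PORT B =====
-- by_head = {}; for p in pieces: by_head.setdefault(p[0], p)
def pvBuildB (pieces : List (List Int)) : PySem.Dict Int (List Int) :=
  pieces.foldl (fun d p =>
    match PySem.List.pyGet? p 0 with
    | none => d              -- Python raises IndexError (p[0] of an empty piece); outside Pre_
    | some h => PySem.Dict.setdefault d h p) PySem.Dict.empty

-- while i < n: p = by_head.get(arr[i]); if p is None or arr[i:i+len(p)] != p: return False; i += len(p)
-- structural fuel only makes the loop total: arr.length + 1 iterations always suffice,
-- every dict value p is nonempty (keyed by p[0]) so i strictly increases (see loopB_eq)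
def pvLoopB (arr : List Int) (d : PySem.Dict Int (List Int)) (fuel : Nat) (i : Nat) : Bool :=
  match fuel with
  | 0 => false               -- unreachable from check_array_formation_alt (proved in loopB_eq)
  | fuel + 1 =>
    if i < arr.length then
      match PySem.List.pyGet? arr (i : Int) with
      | none => false        -- unreachable: i < len(arr)
      | some x =>
        match PySem.Dict.get? d x with
        | none => false
        | some p =>
          if PySem.List.slice arr (some (i : Int)) (some ((i : Int) + (p.length : Int))) = p then
            pvLoopB arr d fuel (i + p.length)
          else false
    else true

def check_array_formation_alt (arr : List Int) (pieces : List (List Int)) : Bool :=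
  pvLoopB arr (pvBuildB pieces) (arr.length + 1) 0

-- ===== PRECONDITION & SPEC =====
-- Pre_ excludes inputs on which A raises (empty arr: UnboundLocalError; an empty piece: IndexError;
-- a piece whose first element occurs in arr too close to arr's end, where A's inner loop can run past
-- the end: IndexError — this last condition is conservative, it also drops some inputs on which A
-- returns), and inputs where two pieces share a first element, on which A's committed piece depends
-- on its scan position inside the pass — an accidental first-vs-later-match corner.
def Pre_check_array_formation (arr : List Int) (pieces : List (List Int)) : Prop :=
  arr ≠ [] ∧ (∀ p ∈ pieces, p ≠ []) ∧ (pieces.map List.head?).Nodup ∧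
  ∀ p ∈ pieces, ∀ i ∈ List.range arr.length, arr[i]? = p.head? → i + p.length ≤ arr.length

instance (arr : List Int) (pieces : List (List Int)) : Decidable (Pre_check_array_formation arr pieces) := by
  unfold Pre_check_array_formation; infer_instance

def pvWitness_check_array_formation : List Int × List (List Int) := ([1, 2, 3], [[1, 2], [3]])

def Spec_check_array_formation (arr : List Int) (pieces : List (List Int)) (out : Bool) : Prop := out = check_array_formation_alt arr pieces
instance (arr : List Int) (pieces : List (List Int)) (out : Bool) : Decidable (Spec_check_array_formation arr pieces out) := by unfold Spec_check_array_formation; infer_instance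

-- ===== CLAIM (what is proved, stated in full; the proofs are below) =====
def Claim_equal_check_array_formation : Prop := ∀ (arr : List Int) (pieces : List (List Int)), Dom_check_array_formation arr pieces → Pre_check_array_formation arr pieces → Spec_check_array_formation arr pieces (check_array_formation arr pieces)

-- ===== LEMMAS AND PROOFS =====

-- the common greedy specification: at each position take the first piece whose head matches
def pvGreedy (arr : List Int) (pieces : List (List Int)) (idx : Nat) : Bool :=
  if _h : idx < arr.length then
    match List.find? (fun q => q.head? == some (arr.getD idx 0)) pieces with
    | none => false
    | some p =>
      if _hp : idx < idx + p.length then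
        if pvInnerA arr idx p = some (idx + p.length) then pvGreedy arr pieces (idx + p.length)
        else false
      else false
  else true
termination_by arr.length - idx
decreasing_by omega

theorem innerA_eq (arr : List Int) (p : List Int) : ∀ idx : Nat,
    pvInnerA arr idx p = if (arr.drop idx).take p.length = p then some (idx + p.length) else none := by
  induction p with
  | nil => intro idx; simp [pvInnerA]
  | cons v rest ih =>
    intro idx
    rw [pvInnerA]
    rcases h : PySem.List.pyGet? arr (idx : Int) with _ | x
    · have hlen : arr.length ≤ idx := by
        by_contra hlt
        push Not at hlt
        simp [PySem.List.pyGet?_natCast, List.getElem?_eq_getElem hlt] at h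
      simp [List.drop_eq_nil_of_le hlen]
    · have hlt : idx < arr.length := by
        by_contra hge
        push Not at hge
        simp [PySem.List.pyGet?_natCast, List.getElem?_eq_none_iff.mpr hge] at h
      have hx : arr[idx] = x := by
        simpa [PySem.List.pyGet?_natCast, List.getElem?_eq_getElem hlt] using h
      have hdrop : arr.drop idx = x :: arr.drop (idx + 1) := by
        rw [List.drop_eq_getElem_cons hlt, hx]
      by_cases hxv : x = v
      · subst hxv
        simp only [ih (idx + 1), hdrop, List.length_cons, List.take_succ_cons]
        by_cases ht : (arr.drop (idx + 1)).take rest.length = rest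
        · simp [ht]; omega
        · simp [ht]
      · simp [hxv, hdrop]

theorem find?_of_head (pieces : List (List Int)) (p : List Int) (x : Int)
    (hnd : (pieces.map List.head?).Nodup) (hp : p ∈ pieces) (hh : p.head? = some x) :
    List.find? (fun q => q.head? == some x) pieces = some p := by
  induction pieces with
  | nil => cases hp
  | cons q rest ih =>
    simp only [List.map_cons, List.nodup_cons] at hnd
    rcases List.mem_cons.mp hp with rfl | hmem
    · simp [hh]
    · have hq : q.head? ≠ some x := by
        intro hqe
        exact hnd.1 (by rw [hqe, ← hh]; exact List.mem_map_of_mem hmem)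
      rw [List.find?_cons]
      simp [ih hnd.2 hmem]
      rw [show (q.head? == some x) = false from beq_eq_false_iff_ne.mpr hq]

theorem get?_build (pieces : List (List Int)) (x : Int) :
    PySem.Dict.get? (pvBuildB pieces) x = List.find? (fun q => q.head? == some x) pieces := by
  have aux : ∀ (ps : List (List Int)) (d : PySem.Dict Int (List Int)),
      PySem.Dict.get? (ps.foldl (fun d p =>
        match PySem.List.pyGet? p 0 with
        | none => d
        | some h => PySem.Dict.setdefault d h p) d) x
      = (PySem.Dict.get? d x).or (List.find? (fun q => q.head? == some x) ps) := by
    intro ps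
    induction ps with
    | nil => intro d; simp
    | cons p rest ih =>
      intro d
      simp only [List.foldl_cons]
      rcases hp0 : PySem.List.pyGet? p 0 with _ | h
      · have hpnil : p = [] := by
          cases p with
          | nil => rfl
          | cons a t => simp [PySem.List.pyGet?, PySem.List.pyIdx?] at hp0
        subst hpnil
        rw [ih, List.find?_cons]
        simp
      · have hph : p.head? = some h := by
          cases p with
          | nil => simp [PySem.List.pyGet?, PySem.List.pyIdx?] at hp0
          | cons a t =>
            simp [PySem.List.pyGet?, PySem.List.pyIdx?] at hp0
            simp [hp0]
        rcases hc : PySem.Dict.contains d h with _ | _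
        · rw [ih, List.find?_cons]
          simp only [PySem.Dict.setdefault_of_not_contains d p hc, PySem.Dict.get?_insert]
          by_cases hxh : x = h
          · subst hxh
            have hdx : PySem.Dict.get? d x = none :=
              (PySem.Dict.get?_eq_none_iff_contains d x).mpr hc
            simp [hdx, hph]
          · have hfalse : (p.head? == some x) = false := by
              simp [hph]; exact fun e => hxh e.symm
            simp [hxh, hfalse]
        · rw [ih, List.find?_cons]
          simp only [PySem.Dict.setdefault_of_contains d p hc]
          by_cases hxh : x = h
          · subst hxh
            rcases hdx : PySem.Dict.get? d x with _ | v
            · rw [PySem.Dict.get?_eq_none_iff_contains] at hdx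
              rw [hdx] at hc; cases hc
            · simp
          · have hfalse : (p.head? == some x) = false := by
              simp [hph]; exact fun e => hxh e.symm
            simp [hfalse]
  rw [pvBuildB, aux, PySem.Dict.get?_empty, Option.none_or]

theorem getD_eq_getElem_of_lt (arr : List Int) (i : Nat) (hi : i < arr.length) :
    arr.getD i 0 = arr[i] := by
  simp [List.getD_eq_getElem?_getD, List.getElem?_eq_getElem hi]

theorem loopB_eq (arr : List Int) (pieces : List (List Int)) : ∀ fuel i : Nat,
    arr.length - i < fuel → pvLoopB arr (pvBuildB pieces) fuel i = pvGreedy arr pieces i := by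
    intro n
    induction n with
    | zero =>
      intro i h
      exact absurd h (by omega)
    | succ n ih =>
      intro i h
      by_cases hi : i < arr.length
      · simp only [pvLoopB]
        rw [pvGreedy, if_pos hi, dif_pos hi]
        have hget : PySem.List.pyGet? arr (i : Int) = some arr[i] := by
          simp [List.getElem?_eq_getElem hi]
        rw [getD_eq_getElem_of_lt arr i hi]
        simp only [hget, get?_build]
        rcases hf : List.find? (fun q => q.head? == some arr[i]) pieces with _ | p
        · simp only [hf]
        · simp only [hf]
          have hhead : p.head? = some arr[i] := by
            have := List.find?_some hf
            simpa using this
          have hp0 : 0 < p.length := by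
            cases p with
            | nil => simp at hhead
            | cons a t => simp
          rw [dif_pos (show i < i + p.length by omega),
            PySem.List.slice_natCast_add, innerA_eq arr p]
          by_cases ht : (arr.drop i).take p.length = p
          · simp only [ht, if_true]
            exact ih (i + p.length) (by omega)
          · simp [ht]
      · simp only [pvLoopB]
        rw [pvGreedy, if_neg hi, dif_neg hi]

theorem forA_spec (arr : List Int) (pieces : List (List Int))
    (Hne : ∀ p ∈ pieces, p ≠ []) (Hnd : (pieces.map List.head?).Nodup) :
    ∀ rest, (∀ p ∈ rest, p ∈ pieces) → ∀ idx res, idx ≤ arr.length → (idx = arr.length → res = true) →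
    (match pvForA arr idx res rest with
     | .inl b => b = pvGreedy arr pieces idx
     | .inr (idx', res') => idx ≤ idx' ∧ idx' ≤ arr.length ∧ (idx' = arr.length → res' = true) ∧
         pvGreedy arr pieces idx' = pvGreedy arr pieces idx ∧
         (res' = true → res = true ∨ idx < idx') ∧
         (res' = false → res = false ∧ idx' = idx ∧ ∀ p ∈ rest, p.head? ≠ some (arr.getD idx 0))) := by
  intro rest
  induction rest with
  | nil =>
    intro _hsub idx res hle hinv
    rw [pvForA]
    exact ⟨le_refl idx, hle, hinv, rfl, fun h => Or.inl h, fun hr => ⟨hr, rfl, by simp⟩⟩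
  | cons p rest ih =>
    intro hsub idx res hle hinv
    rw [pvForA]
    by_cases hidx : idx = arr.length
    · simp only [if_pos hidx]
      show res = pvGreedy arr pieces idx
      have hg : pvGreedy arr pieces idx = true := by
        rw [pvGreedy]; simp [hidx]
      rw [hg, hinv hidx]
    · simp only [if_neg hidx]
      have hi : idx < arr.length := by omega
      have hget : PySem.List.pyGet? arr (idx : Int) = some arr[idx] := by
        simp [List.getElem?_eq_getElem hi]
      have hpmem : p ∈ pieces := hsub p List.mem_cons_self
      have hpne : p ≠ [] := Hne p hpmem
      obtain ⟨a, t, rfl⟩ : ∃ a t, p = a :: t := by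
        cases p with
        | nil => exact absurd rfl hpne
        | cons a t => exact ⟨a, t, rfl⟩
      have hget0 : PySem.List.pyGet? (a :: t) 0 = some a := by
        simp [PySem.List.pyGet?, PySem.List.pyIdx?]
      simp only [hget, hget0]
      by_cases hxa : arr[idx] = a
      · simp only [if_pos hxa, innerA_eq arr (a :: t)]
        have hha : (a :: t).head? = some arr[idx] := by simp [hxa]
        have hfind := find?_of_head pieces (a :: t) arr[idx] Hnd hpmem hha
        by_cases ht : (arr.drop idx).take (a :: t).length = a :: t
        · simp only [ht, if_true]
          have hlen : idx + (a :: t).length ≤ arr.length := by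
            have h2 := congrArg List.length ht
            rw [List.length_take, List.length_drop] at h2
            omega
          have hgr : pvGreedy arr pieces (idx + (a :: t).length) = pvGreedy arr pieces idx := by
            conv_rhs => rw [pvGreedy]
            rw [getD_eq_getElem_of_lt arr idx hi]
            simp only [dif_pos hi, hfind]
            rw [dif_pos (Nat.lt_add_of_pos_right (by simp : 0 < (a :: t).length)),
              innerA_eq arr (a :: t), if_pos ht, if_pos rfl]
          have hrec := ih (fun q hq => hsub q (List.mem_cons_of_mem (a :: t) hq))
            (idx + (a :: t).length) true hlen (fun _ => rfl)
          revert hrec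
          cases hE : pvForA arr (idx + (a :: t).length) true rest with
          | inl b =>
            intro hrec
            exact hrec.trans hgr
          | inr pr =>
            obtain ⟨idx2, res2⟩ := pr
            intro hrec
            obtain ⟨h1, h2, h3, h4, _h5, h6⟩ := hrec
            refine ⟨le_trans (Nat.le_add_right _ _) h1, h2, h3, h4.trans hgr, ?_, ?_⟩
            · intro _
              exact Or.inr (lt_of_lt_of_le (by simp) h1)
            · intro hr
              exact absurd (h6 hr).1 (by simp)
        · simp only [ht, if_false]
          show false = pvGreedy arr pieces idx
          conv_rhs => rw [pvGreedy]
          rw [getD_eq_getElem_of_lt arr idx hi]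
          simp only [dif_pos hi, hfind]
          rw [dif_pos (Nat.lt_add_of_pos_right (by simp : 0 < (a :: t).length)),
            innerA_eq arr (a :: t), if_neg ht, if_neg (by simp)]
      · simp only [if_neg hxa]
        have hrec := ih (fun q hq => hsub q (List.mem_cons_of_mem (a :: t) hq)) idx res hle hinv
        revert hrec
        cases hE : pvForA arr idx res rest with
        | inl b => exact fun h => h
        | inr pr =>
          obtain ⟨idx2, res2⟩ := pr
          intro hrec
          obtain ⟨h1, h2, h3, h4, h5, h6⟩ := hrec
          refine ⟨h1, h2, h3, h4, h5, fun hr => ?_⟩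
          obtain ⟨ha, hb, hc⟩ := h6 hr
          refine ⟨ha, hb, fun q hq => ?_⟩
          rcases List.mem_cons.mp hq with rfl | hq'
          · rw [getD_eq_getElem_of_lt arr idx hi]
            simp only [List.head?_cons]
            exact fun e => hxa (Option.some.inj e).symm
          · exact hc q hq' 

theorem whileA_eq (arr : List Int) (pieces : List (List Int))
    (Hne : ∀ p ∈ pieces, p ≠ []) (Hnd : (pieces.map List.head?).Nodup) :
    ∀ fuel idx res, arr.length - idx < fuel → idx ≤ arr.length → (idx = arr.length → res = true) →
    pvWhileA arr pieces fuel idx res = pvGreedy arr pieces idx := by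
  intro n
  induction n with
  | zero =>
    intro idx res hn hle hinv
    exact absurd hn (by omega)
  | succ n ih =>
    intro idx res hn hle hinv
    by_cases hi : idx < arr.length
    · simp only [pvWhileA]
      rw [if_pos hi]
      have hfor := forA_spec arr pieces Hne Hnd pieces (fun q hq => hq) idx false hle
        (fun h => absurd h (by omega))
      revert hfor
      cases hF : pvForA arr idx false pieces with
      | inl b => exact fun h => h
      | inr pr =>
        obtain ⟨idx', res'⟩ := pr
        intro hfor
        obtain ⟨h1, h2, h3, h4, h5, h6⟩ := hfor
        cases res' with
        | false =>
          obtain ⟨_, _hid, hnone⟩ := h6 rfl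
          show false = pvGreedy arr pieces idx
          have hfind : List.find? (fun q => q.head? == some arr[idx]) pieces = none := by
            apply List.find?_eq_none.mpr
            intro q hq
            have hx := hnone q hq
            rw [getD_eq_getElem_of_lt arr idx hi] at hx
            simpa using hx
          rw [pvGreedy]
          simp [hi, hfind]
        | true =>
          have hlt : idx < idx' := by
            rcases h5 rfl with h | h
            · exact absurd h (by simp)
            · exact h
          simp only [if_true]
          rw [ih idx' true (by omega) h2 h3]
          exact h4
    · have hidx : idx = arr.length := by omega
      simp only [pvWhileA]
      rw [pvGreedy]
      simp [hidx, hinv hidx]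

-- ===== VERDICT (by name: the statement is the Claim_ definition above) =====
theorem check_array_formation_spec : Claim_equal_check_array_formation := by
  intro arr pieces _hdom hpre
  obtain ⟨h0, hne, hnd, _hov⟩ := hpre
  unfold Spec_check_array_formation check_array_formation check_array_formation_alt
  rw [whileA_eq arr pieces hne hnd (arr.length + 1) 0 false (by omega) (by omega)
      (by intro h; exact absurd h.symm (by simpa using h0))]
  rw [loopB_eq arr pieces (arr.length + 1) 0 (by omega)]
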